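-- pv_equiv track=rewrite | github.com/dainsiahtill-dev/Polaris | src/backend/polaris/infrastructure/accel/query/planner.py | build_candidate_files
-- ===== SOURCE A (Python) =====
-- def build_candidate_files(
--     indexed_files: list[str],
--     changed_files: list[str] | None = None,
-- ) -> list[str]:
--     unique = sorted(set(indexed_files))
--     if not changed_files:
--         return unique
--     changed = [item.replace("\\", "/") for item in changed_files]
--     changed_set = set(changed)
--     # Strong constraint: always include changed files when they exist in index.
--     prioritized = [path for path in unique if path in changed_set]
--     remaining = [path for path in unique if path not in changed_set]
--     return prioritized + remaining
-- ===== SOURCE B (Python) =====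
-- def build_candidate_files(
--     indexed_files: list[str],
--     changed_files: list[str] | None = None,
-- ) -> list[str]:
--     changed = {p.replace("\\", "/") for p in changed_files or []}
--     return sorted(sorted(set(indexed_files)), key=lambda p: p not in changed)
-- ===== Notes on version B (the rewrite author's own statement) =====
-- stated objective: idiomatic
-- what changed: Replaces the branch plus two partition comprehensions with a single stable boolean-keyed sort (p not in changed) over the sorted deduped input; the falsy changed_files case falls out of the same expression.
import Mathlib
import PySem

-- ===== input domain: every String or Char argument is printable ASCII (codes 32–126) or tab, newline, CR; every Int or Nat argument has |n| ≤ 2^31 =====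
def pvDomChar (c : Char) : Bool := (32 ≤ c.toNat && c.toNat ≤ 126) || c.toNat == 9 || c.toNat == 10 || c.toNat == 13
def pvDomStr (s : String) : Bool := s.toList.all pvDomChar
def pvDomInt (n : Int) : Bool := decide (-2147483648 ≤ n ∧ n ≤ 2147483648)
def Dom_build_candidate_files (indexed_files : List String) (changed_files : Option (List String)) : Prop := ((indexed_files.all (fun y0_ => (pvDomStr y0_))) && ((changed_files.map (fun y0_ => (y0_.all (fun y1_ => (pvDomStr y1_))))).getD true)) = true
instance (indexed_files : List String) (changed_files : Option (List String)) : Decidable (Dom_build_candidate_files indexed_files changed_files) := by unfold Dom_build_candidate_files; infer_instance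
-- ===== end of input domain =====

-- B replaces A's branch and two partition comprehensions with one stable boolean-keyed
-- sort (key: p not in changed) over the sorted deduped input — same cost, more idiomatic.

-- ===== PORT A =====
def build_candidate_files (indexed_files : List String) (changed_files : Option (List String)) : List String :=
  let unique := PySem.List.sorted (PySem.Set.ofList indexed_files) (fun p => p)
  match changed_files with
  | none => unique
  | some cf =>
    if cf = [] then unique
    else
      let changed := cf.map (fun item => PySem.Str.replace item "\\" "/")
      let changed_set := PySem.Set.ofList changed
      let prioritized := unique.filter (fun path => PySem.Set.contains changed_set path)
      let remaining := unique.filter (fun path => !(PySem.Set.contains changed_set path))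
      prioritized ++ remaining

-- ===== PORT B =====
def build_candidate_files_alt (indexed_files : List String) (changed_files : Option (List String)) : List String :=
  let changed : PySem.Set String :=
    PySem.Set.ofList ((changed_files.getD []).map (fun p => PySem.Str.replace p "\\" "/"))
  PySem.List.sorted (PySem.List.sorted (PySem.Set.ofList indexed_files) (fun p => p))
    (fun p => !(PySem.Set.contains changed p))

-- ===== PRECONDITION & SPEC =====
def Spec_build_candidate_files (indexed_files : List String) (changed_files : Option (List String)) (out : List String) : Prop := out = build_candidate_files_alt indexed_files changed_files
instance (indexed_files : List String) (changed_files : Option (List String)) (out : List String) : Decidable (Spec_build_candidate_files indexed_files changed_files out) := by unfold Spec_build_candidate_files; infer_instance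

-- ===== CLAIM (what is proved, stated in full; the proofs are below) =====
def Claim_equal_build_candidate_files : Prop := ∀ (indexed_files : List String) (changed_files : Option (List String)), Dom_build_candidate_files indexed_files changed_files → Spec_build_candidate_files indexed_files changed_files (build_candidate_files indexed_files changed_files)

-- ===== LEMMAS AND PROOFS =====

-- insertBy steps
theorem insertBy_here {α : Type} (before : α → α → Bool) (x a : α) (l : List α)
    (h : before x a = true) : PySem.List.insertBy before x (a :: l) = x :: a :: l := by
  simp [PySem.List.insertBy, h]

theorem insertBy_skip {α : Type} (before : α → α → Bool) (x a : α) (l : List α)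
    (h : before x a = false) : PySem.List.insertBy before x (a :: l) = a :: PySem.List.insertBy before x l := by
  simp [PySem.List.insertBy, h]

-- inserting with a boolean key: a false-key element lands between the false block and the
-- true block, a true-key element lands at the very end
theorem insertBy_bool_partition {α : Type} (key : α → Bool) (x : α) (F T : List α)
    (hF : ∀ a ∈ F, key a = false) (hT : ∀ b ∈ T, key b = true) :
    PySem.List.insertBy (fun a b => decide (key a < key b)) x (F ++ T)
      = if key x then F ++ (T ++ [x]) else (F ++ [x]) ++ T := by
  induction F with
  | nil =>
    cases hx : key x with
    | false =>
      cases T with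
      | nil => simp [PySem.List.insertBy]
      | cons b T' =>
        have hb := hT b (by simp)
        rw [List.nil_append, insertBy_here _ _ _ _ (by simp [hx, hb])]
        simp
    | true =>
      rw [PySem.List.insertBy_of_forall_not_before]
      · simp
      · intro y _; simp [hx]
  | cons a F' ih =>
    have ha := hF a (by simp)
    rw [List.cons_append, insertBy_skip _ _ _ _ (by simp [ha]),
        ih (fun c hc => hF c (by simp [hc]))]
    cases key x <;> simp

-- a stable sort by a boolean key is the stable partition: false-key elements (in order)
-- then true-key elements (in order)
theorem sorted_bool_eq_partition {α : Type} (l : List α) (key : α → Bool) :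
    PySem.List.sorted l key
      = l.filter (fun a => !(key a)) ++ l.filter key := by
  rw [PySem.List.sorted_eq_foldl_insertBy]
  suffices h : ∀ (l F T : List α), (∀ a ∈ F, key a = false) → (∀ b ∈ T, key b = true) →
      l.foldl (fun acc x => PySem.List.insertBy (fun a b => decide (key a < key b)) x acc) (F ++ T)
        = (F ++ l.filter (fun a => !(key a))) ++ (T ++ l.filter key) by
    simpa using h l [] [] (by simp) (by simp)
  intro l
  induction l with
  | nil => intro F T _ _; simp
  | cons x l ih =>
    intro F T hF hT
    rw [List.foldl_cons, insertBy_bool_partition key x F T hF hT]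
    cases hx : key x with
    | false =>
      have hF' : ∀ a ∈ F ++ [x], key a = false := by
        intro a ha
        rcases List.mem_append.mp ha with h | h
        · exact hF a h
        · rw [List.mem_singleton.mp h]; exact hx
      rw [if_neg (by simp), ih (F ++ [x]) T hF' hT]
      simp [hx]
    | true =>
      have hT' : ∀ b ∈ T ++ [x], key b = true := by
        intro b hb
        rcases List.mem_append.mp hb with h | h
        · exact hT b h
        · rw [List.mem_singleton.mp h]; exact hx
      rw [if_pos rfl, ih F (T ++ [x]) hF hT']
      simp [hx]

-- ===== VERDICT (by name: the statement is the Claim_ definition above) =====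
theorem build_candidate_files_spec : Claim_equal_build_candidate_files := by
  intro indexed_files changed_files _
  unfold Spec_build_candidate_files build_candidate_files build_candidate_files_alt
  rw [sorted_bool_eq_partition]
  cases changed_files with
  | none => simp [PySem.Set.ofList, PySem.Set.contains]
  | some cf =>
    by_cases hcf : cf = []
    · subst hcf
      simp [PySem.Set.ofList, PySem.Set.contains]
    · simp [hcf]
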